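-- pv_equiv track=rewrite | github.com/demurre/UniLabs | Python/analysis/vigenere_cipher.py | generate_key_from_password
-- ===== SOURCE A (Python) =====
-- def generate_key_from_password(password: str, length: int = 10) -> str:
--     """
--     Generates a Vigenere key from a password.
--     """
--     if not password:
--         raise ValueError("Password cannot be empty")
--
--     letters = "".join(c for c in password if c.isalpha()).upper()
--
--     if not letters:
--         raise ValueError("Password must contain at least one letter")
--
--     key = (letters * ((length // len(letters)) + 1))[:length]
--     return key
-- ===== SOURCE B (Python) =====
-- def generate_key_from_password(password: str, length: int = 10) -> str:
--     """
--     Generates a Vigenere key from a password.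
--     """
--     if not password:
--         raise ValueError("Password cannot be empty")
--
--     letters = "".join(c for c in password if c.isalpha()).upper()
--
--     if not letters:
--         raise ValueError("Password must contain at least one letter")
--
--     n = len(letters)
--     return "".join(letters[i % n] for i in range(length))
-- ===== Notes on version B (the rewrite author's own statement) =====
-- stated objective: alternative
-- what changed: Replaces 'replicate the whole letter string (length // n + 1) times then slice [:length]' with direct per-position construction: emit exactly length characters by modular indexing letters[i % n] over range(length).
import Mathlib
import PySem

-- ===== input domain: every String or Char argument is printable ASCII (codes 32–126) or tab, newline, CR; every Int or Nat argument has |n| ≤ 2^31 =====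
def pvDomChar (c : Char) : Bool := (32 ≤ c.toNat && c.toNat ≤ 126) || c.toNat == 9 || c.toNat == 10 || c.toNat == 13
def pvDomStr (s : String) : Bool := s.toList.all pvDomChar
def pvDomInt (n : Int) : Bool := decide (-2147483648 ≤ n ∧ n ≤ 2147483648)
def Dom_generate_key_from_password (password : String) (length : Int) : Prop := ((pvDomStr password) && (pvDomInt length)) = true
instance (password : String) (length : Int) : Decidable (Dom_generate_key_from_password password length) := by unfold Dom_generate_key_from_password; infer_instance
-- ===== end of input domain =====

-- B builds the key position-by-position with modular indexing instead of A's replicate-then-slice; alternative decomposition, same cost.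


-- ===== PORT A =====
-- A's two guards only raise ValueError; those inputs are excluded by Pre_ below.
def generate_key_from_password (password : String) (length : Int) : String :=
  let letters : List Char := PySem.Chars.upper (password.toList.filter PySem.Chars.isalpha)
  let key : List Char :=
    PySem.List.slice
      (PySem.List.pyRepeat letters (PySem.Int.floordiv length (letters.length : Int) + 1))
      none (some length)
  String.ofList key

-- ===== PORT B =====
def generate_key_from_password_alt (password : String) (length : Int) : String :=
  let letters : List Char := PySem.Chars.upper (password.toList.filter PySem.Chars.isalpha)
  let n : Int := (letters.length : Int)
  String.ofList ((PySem.List.pyRange 0 length 1).map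
    (fun i => PySem.List.pyGetD letters (PySem.Int.mod i n) ' '))

-- ===== PRECONDITION & SPEC =====
-- Pre_ excludes exactly the inputs where A raises ValueError: passwords with no alphabetic
-- character (this includes the empty password, caught by A's first guard).
def Pre_generate_key_from_password (password : String) (length : Int) : Prop :=
  password.toList.any PySem.Chars.isalpha = true
instance (password : String) (length : Int) : Decidable (Pre_generate_key_from_password password length) := by unfold Pre_generate_key_from_password; infer_instance
def pvWitness_generate_key_from_password : String × Int := ("aB c3", 10)

def Spec_generate_key_from_password (password : String) (length : Int) (out : String) : Prop := out = generate_key_from_password_alt password length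
instance (password : String) (length : Int) (out : String) : Decidable (Spec_generate_key_from_password password length out) := by unfold Spec_generate_key_from_password; infer_instance

-- ===== CLAIM (what is proved, stated in full; the proofs are below) =====
def Claim_equal_generate_key_from_password : Prop := ∀ (password : String) (length : Int), Dom_generate_key_from_password password length → Pre_generate_key_from_password password length → Spec_generate_key_from_password password length (generate_key_from_password password length)

-- ===== LEMMAS AND PROOFS =====

-- flatten of a replicated block, written as a range of modular indices
lemma flatten_replicate_eq_map_range (xs : List Char) (hx : xs ≠ []) (m : Nat) :
    (List.replicate m xs).flatten
      = (List.range (m * xs.length)).map (fun k => xs.getD (k % xs.length) ' ') := by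
  induction m with
  | zero => simp
  | succ m ih =>
    have hn : 0 < xs.length := List.length_pos_iff.mpr hx
    have hrw : (m + 1) * xs.length = xs.length + m * xs.length := by ring
    rw [List.replicate_succ, List.flatten_cons, ih, hrw, List.range_add, List.map_append]
    congr 1
    · apply List.ext_getElem
      · simp
      · intro j hj hj'
        have hjn : j < xs.length := by simpa using hj
        simp [Nat.mod_eq_of_lt hjn, List.getD_eq_getElem?_getD, List.getElem?_eq_getElem hjn]
    · rw [List.map_map]
      apply List.map_congr_left
      intro k _
      simp [Nat.add_mod_left]

-- the key list produced by A's slice equals B's modular-index map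
lemma key_eq (letters : List Char) (hl : letters ≠ []) (length : Int) :
    PySem.List.slice
        (PySem.List.pyRepeat letters (PySem.Int.floordiv length (letters.length : Int) + 1))
        none (some length)
      = (PySem.List.pyRange 0 length 1).map
          (fun i => PySem.List.pyGetD letters (PySem.Int.mod i (letters.length : Int)) ' ') := by
  have hn : 0 < letters.length := List.length_pos_iff.mpr hl
  by_cases hpos : 0 ≤ length
  · -- length ≥ 0
    obtain ⟨L, rfl⟩ : ∃ L : Nat, length = (L : Int) := ⟨length.toNat, (Int.toNat_of_nonneg hpos).symm⟩
    rw [PySem.Int.floordiv_natCast]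
    have hcnt : (((L / letters.length : Nat) : Int) + 1).toNat = L / letters.length + 1 := by
      generalize L / letters.length = q
      omega
    unfold PySem.List.pyRepeat
    rw [hcnt, PySem.List.slice_to_natCast,
        flatten_replicate_eq_map_range letters hl (L / letters.length + 1),
        ← List.map_take, List.take_range]
    have hmin : min L ((L / letters.length + 1) * letters.length) = L := by
      have := (Nat.div_lt_iff_lt_mul hn).mp (Nat.lt_succ_self (L / letters.length))
      rw [Nat.succ_eq_add_one] at this
      omega
    rw [hmin, PySem.List.pyRange_one]
    simp only [List.map_map]
    apply List.map_congr_left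
    intro k hk
    simp only [Function.comp_apply, zero_add]
    have h1 : PySem.Int.mod (k : Int) (letters.length : Int) = ((k % letters.length : Nat) : Int) :=
      PySem.Int.mod_natCast k letters.length
    rw [h1, PySem.List.pyGetD_natCast]
  · -- length < 0: both sides are empty
    have hr : PySem.List.pyRange 0 length 1 = [] :=
      PySem.List.pyRange_one_eq_nil (by omega)
    have hq : PySem.Int.floordiv length (letters.length : Int) < 0 := by
      rw [PySem.Int.floordiv_lt_iff_lt_mul (by exact_mod_cast hn : (0:Int) < (letters.length : Int))]
      simpa using (by omega : length < 0)
    have hcnt : (PySem.Int.floordiv length (letters.length : Int) + 1).toNat = 0 := by omega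
    unfold PySem.List.pyRepeat
    rw [hcnt, hr]
    simp [PySem.List.slice]

-- ===== VERDICT (by name: the statement is the Claim_ definition above) =====
theorem generate_key_from_password_spec : Claim_equal_generate_key_from_password := by
  intro password length _hdom hpre
  unfold Spec_generate_key_from_password
  have hne : password.toList.filter PySem.Chars.isalpha ≠ [] := by
    unfold Pre_generate_key_from_password at hpre
    rw [List.any_eq_true] at hpre
    obtain ⟨c, hc, hca⟩ := hpre
    exact List.ne_nil_of_mem (List.mem_filter.mpr ⟨hc, hca⟩)
  have hl : PySem.Chars.upper (password.toList.filter PySem.Chars.isalpha) ≠ [] := by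
    simpa [PySem.Chars.upper] using hne
  simp only [generate_key_from_password, generate_key_from_password_alt]
  exact congrArg String.ofList (key_eq _ hl length)
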